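-- pv_equiv track=rewrite | github.com/defrancisco/ThePythonFiles | algoritmoyestructuradedatosI/primerparcial/miprimerparcial/MatrizVecinos.py | buscarmaximoentorno
-- ===== SOURCE A (Python) =====
-- def sumarentorno(mat, f,  c):
--     tamaño = len(mat)
--     suma = 0
--     for i in range(f-1, f+2): # f-1 es el 1er valor del rango, f es el 2do y f+1 es el 3ro
--         for j in range(c-1, c+2):
--             if i>=0 and i<tamaño and j>=0 and j<tamaño:   # Si no nos excedimos de los bordes de la matriz...
--                 suma += mat[i][j]                         # ...sumamos el elemento
--     suma -= mat[f][c]   # Restamos el elemento del centro, porque también fue sumado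
--     return suma
--
-- def buscarmaximoentorno(mat):
--     tamaño = len(mat)
--     mayor = 0
--     fmayor = 0
--     cmayor = 0
--     for f in range(tamaño):
--         for c in range(tamaño):
--             suma = sumarentorno(mat, f, c) #llamo la función así se la suma de cada una
--             if suma>mayor:
--                 mayor = suma
--                 fmayor = f
--                 cmayor = c
--     return fmayor, cmayor, mayor
-- ===== SOURCE B (Python) =====
-- def buscarmaximoentorno(mat):
--     n = len(mat)
--     # scatter pass: each cell's value is added into the neighborhood totals of its 8 neighbors
--     sums = [[0] * n for _ in range(n)]
--     for i in range(n):
--         for j in range(n):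
--             v = mat[i][j]
--             for di in (-1, 0, 1):
--                 for dj in (-1, 0, 1):
--                     if di == 0 and dj == 0:
--                         continue
--                     a = i + di
--                     b = j + dj
--                     if 0 <= a < n and 0 <= b < n:
--                         sums[a][b] += v
--     # max-scan pass over the accumulator table
--     mayor = 0
--     fmayor = 0
--     cmayor = 0
--     for f in range(n):
--         for c in range(n):
--             if sums[f][c] > mayor:
--                 mayor = sums[f][c]
--                 fmayor = f
--                 cmayor = c
--     return fmayor, cmayor, mayor
-- ===== Notes on version B (the rewrite author's own statement) =====
-- stated objective: alternative
-- what changed: A gathers each cell's 3x3 neighborhood with a bounds-checked 9-cell read per cell; B instead builds an n x n accumulator table in a scatter pass (each value is added into the totals of its 8 in-bounds neighbors, never its own cell) and then finds the winner in a separate strict-max scan over the table.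
import Mathlib
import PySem

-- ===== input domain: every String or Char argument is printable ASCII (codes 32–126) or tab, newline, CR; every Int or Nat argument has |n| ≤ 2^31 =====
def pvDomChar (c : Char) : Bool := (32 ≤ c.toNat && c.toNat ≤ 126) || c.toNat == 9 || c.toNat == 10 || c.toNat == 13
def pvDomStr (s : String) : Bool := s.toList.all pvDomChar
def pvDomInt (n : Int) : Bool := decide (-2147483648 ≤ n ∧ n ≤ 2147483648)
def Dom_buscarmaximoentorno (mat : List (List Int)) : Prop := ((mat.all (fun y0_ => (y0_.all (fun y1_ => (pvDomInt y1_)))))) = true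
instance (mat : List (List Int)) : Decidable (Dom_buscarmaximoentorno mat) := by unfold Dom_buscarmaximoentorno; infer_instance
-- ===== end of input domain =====

-- B replaces A's per-cell bounds-checked 3x3 gather by a scatter pass filling an n x n accumulator
-- table (each value added into its 8 in-bounds neighbors' totals) followed by a separate strict-max
-- scan of the table; objective: alternative decomposition, same asymptotic cost.

-- ===== PORT A =====
-- the pyGetD accesses are in bounds on every input admitted by Pre_ (Python raises IndexError outside it)
def sumarentorno (mat : List (List Int)) (f c : Int) : Int :=
  let n : Int := mat.length
  let suma : Int :=
    (PySem.List.pyRange (f-1) (f+2) 1).foldl (fun s i =>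
      (PySem.List.pyRange (c-1) (c+2) 1).foldl (fun s j =>
        if i ≥ 0 ∧ i < n ∧ j ≥ 0 ∧ j < n then
          s + PySem.List.pyGetD (PySem.List.pyGetD mat i []) j 0
        else s) s) 0
  suma - PySem.List.pyGetD (PySem.List.pyGetD mat f []) c 0

def buscarmaximoentorno (mat : List (List Int)) : Int × Int × Int :=
  let n : Int := mat.length
  (PySem.List.pyRange 0 n 1).foldl (fun st f =>
    (PySem.List.pyRange 0 n 1).foldl (fun st c =>
      let suma := sumarentorno mat f c
      if suma > st.2.2 then (f, c, suma) else st) st) ((0:Int), (0:Int), (0:Int))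

-- ===== PORT B =====
-- sums[a][b] += v, written with the total PySem index primitives (a, b are guarded in range)
def pvAdd2 (g : List (List Int)) (a b : Int) (v : Int) : List (List Int) :=
  PySem.List.pySetD g a
    (PySem.List.pySetD (PySem.List.pyGetD g a [])
      b (PySem.List.pyGetD (PySem.List.pyGetD g a []) b 0 + v))

-- sums = [[0]*n for _ in range(n)]
def pvSums0 (n : Int) : List (List Int) :=
  (PySem.List.pyRange 0 n 1).map (fun _ => (PySem.List.pyRange 0 n 1).map (fun _ => (0:Int)))

-- the scatter pass over every cell and its 8 neighbor offsets
def pvScatter (mat : List (List Int)) (n : Int) : List (List Int) :=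
  (PySem.List.pyRange 0 n 1).foldl (fun g i =>
    (PySem.List.pyRange 0 n 1).foldl (fun g j =>
      let v := PySem.List.pyGetD (PySem.List.pyGetD mat i []) j 0
      ([-1, 0, 1] : List Int).foldl (fun g di =>
        ([-1, 0, 1] : List Int).foldl (fun g dj =>
          if di = 0 ∧ dj = 0 then g
          else
            if 0 ≤ i + di ∧ i + di < n ∧ 0 ≤ j + dj ∧ j + dj < n then
              pvAdd2 g (i + di) (j + dj) v
            else g) g) g) g) (pvSums0 n)

def buscarmaximoentorno_alt (mat : List (List Int)) : Int × Int × Int :=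
  let n : Int := mat.length
  let sums := pvScatter mat n
  -- max-scan pass
  (PySem.List.pyRange 0 n 1).foldl (fun st f =>
    (PySem.List.pyRange 0 n 1).foldl (fun st c =>
      let s := PySem.List.pyGetD (PySem.List.pyGetD sums f []) c 0
      if s > st.2.2 then (f, c, s) else st) st) ((0:Int), (0:Int), (0:Int))

-- ===== PRECONDITION & SPEC =====
-- Pre_ excludes exactly the inputs on which Python A raises IndexError: some row shorter than len(mat).
def Pre_buscarmaximoentorno (mat : List (List Int)) : Prop :=
  ∀ row ∈ mat, mat.length ≤ row.length
instance (mat : List (List Int)) : Decidable (Pre_buscarmaximoentorno mat) := by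
  unfold Pre_buscarmaximoentorno; infer_instance
def pvWitness_buscarmaximoentorno : List (List Int) := [[1, 2], [3, 4]]
def Spec_buscarmaximoentorno (mat : List (List Int)) (out : Int × Int × Int) : Prop := out = buscarmaximoentorno_alt mat
instance (mat : List (List Int)) (out : Int × Int × Int) : Decidable (Spec_buscarmaximoentorno mat out) := by unfold Spec_buscarmaximoentorno; infer_instance

-- ===== CLAIM (what is proved, stated in full; the proofs are below) =====
def Claim_equal_buscarmaximoentorno : Prop := ∀ (mat : List (List Int)), Dom_buscarmaximoentorno mat → Pre_buscarmaximoentorno mat → Spec_buscarmaximoentorno mat (buscarmaximoentorno mat)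

-- ===== LEMMAS AND PROOFS =====

-- reading one cell of a grid
def pvGet (g : List (List Int)) (f c : Int) : Int :=
  PySem.List.pyGetD (PySem.List.pyGetD g f []) c 0

-- the grid is n x n (or wider rows; enough for the indices used)
def pvRect (n : Nat) (g : List (List Int)) : Prop :=
  g.length = n ∧ ∀ row ∈ g, row.length = n

theorem pvGetD_mem {α : Type} (l : List α) (i : Nat) (d : α) (h : i < l.length) :
    l.getD i d ∈ l := by
  rw [List.getD_eq_getElem?_getD, List.getElem?_eq_getElem h]
  exact List.getElem_mem h

theorem pvRect_add2 (n : Nat) (g : List (List Int)) (a b v : Int)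
    (hg : pvRect n g) (ha : 0 ≤ a) (ha' : a < (n:Int)) (hb : 0 ≤ b) :
    pvRect n (pvAdd2 g a b v) := by
  obtain ⟨hlen, hrows⟩ := hg
  have haN : a.toNat < g.length := by omega
  unfold pvAdd2
  rw [PySem.List.pySetD_of_nonneg _ _ ha, PySem.List.pySetD_of_nonneg _ _ hb,
      PySem.List.pyGetD_of_nonneg _ _ ha, PySem.List.pyGetD_of_nonneg _ _ hb]
  refine ⟨by simpa using hlen, ?_⟩
  intro row hrow
  rcases List.mem_or_eq_of_mem_set hrow with h | h
  · exact hrows row h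
  · subst h
    rw [List.length_set]
    exact hrows _ (pvGetD_mem _ _ _ haN)

theorem pvGet_add2 (n : Nat) (g : List (List Int)) (a b v f c : Int)
    (hg : pvRect n g) (ha : 0 ≤ a) (ha' : a < (n:Int)) (hb : 0 ≤ b) (hb' : b < (n:Int))
    (hf : 0 ≤ f) (hf' : f < (n:Int)) (hc : 0 ≤ c) (hc' : c < (n:Int)) :
    pvGet (pvAdd2 g a b v) f c = pvGet g f c + (if a = f ∧ b = c then v else 0) := by
  obtain ⟨hlen, hrows⟩ := hg
  have haN : a.toNat < g.length := by omega
  have hfN : f.toNat < g.length := by omega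
  unfold pvGet pvAdd2
  rw [PySem.List.pySetD_of_nonneg _ _ ha, PySem.List.pySetD_of_nonneg _ _ hb,
      PySem.List.pyGetD_of_nonneg _ _ ha, PySem.List.pyGetD_of_nonneg _ _ hb,
      PySem.List.pyGetD_of_nonneg _ _ hf, PySem.List.pyGetD_of_nonneg _ _ hc]
  simp only [List.getD_eq_getElem?_getD]
  have hrowlen : ((g[a.toNat]?.getD []) : List Int).length = n :=
    hrows _ (by rw [← List.getD_eq_getElem?_getD]; exact pvGetD_mem _ _ _ haN)
  have hbN : b.toNat < ((g[a.toNat]?.getD []) : List Int).length := by omega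
  by_cases hfa : a = f
  · subst hfa
    rw [List.getElem?_set_self haN, Option.getD_some]
    by_cases hcb : b = c
    · subst hcb
      rw [List.getElem?_set_self hbN, Option.getD_some, if_pos ⟨rfl, rfl⟩,
          PySem.List.pyGetD_of_nonneg _ _ ha, PySem.List.pyGetD_of_nonneg _ _ hb]
      simp [List.getD_eq_getElem?_getD]
    · have hne : b.toNat ≠ c.toNat := by omega
      rw [List.getElem?_set_ne hne, if_neg (by tauto),
          PySem.List.pyGetD_of_nonneg _ _ ha, PySem.List.pyGetD_of_nonneg _ _ hc]
      simp [List.getD_eq_getElem?_getD]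
  · have hne : a.toNat ≠ f.toNat := by omega
    rw [List.getElem?_set_ne hne, if_neg (by tauto),
        PySem.List.pyGetD_of_nonneg _ _ hf, PySem.List.pyGetD_of_nonneg _ _ hc]
    simp [List.getD_eq_getElem?_getD]

-- generic scatter-fold invariant: rectangularity is preserved and one cell accumulates the deltas
theorem pvFoldGet {α : Type} (n : Nat) (f c : Int)
    (step : List (List Int) → α → List (List Int)) (δ : α → Int) (l : List α)
    (h : ∀ g x, x ∈ l → pvRect n g →
      pvRect n (step g x) ∧ pvGet (step g x) f c = pvGet g f c + δ x) :
    ∀ g, pvRect n g →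
      pvRect n (l.foldl step g) ∧
      pvGet (l.foldl step g) f c = pvGet g f c + (l.map δ).sum := by
  induction l with
  | nil => intro g hg; exact ⟨hg, by simp⟩
  | cons x t ih =>
    intro g hg
    obtain ⟨h1, h2⟩ := h g x (List.mem_cons_self ..) hg
    obtain ⟨h3, h4⟩ := ih (fun g y hy hg => h g y (List.mem_cons_of_mem _ hy) hg) (step g x) h1
    exact ⟨h3, by simp [List.foldl_cons, h4, h2]; ring⟩

-- a guarded additive foldl is the init plus the sum of guarded terms
theorem pvIteFold (l : List Int) (p : Int → Prop) [DecidablePred p] (w : Int → Int) (s : Int) :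
    l.foldl (fun s j => if p j then s + w j else s) s
      = s + (l.map (fun j => if p j then w j else 0)).sum := by
  rw [show (fun s j => if p j then s + w j else s)
        = (fun s j => s + if p j then w j else 0) from by funext s j; split <;> simp]
  exact PySem.List.foldl_add _ _ _

-- a point sum over a duplicate-free list
theorem pvPointSum (l : List Int) (hl : l.Nodup) (t : Int) (w : Int → Int) :
    (l.map (fun i => if i = t then w i else 0)).sum = if t ∈ l then w t else 0 := by
  induction l with
  | nil => simp
  | cons x s ih =>
    rcases List.nodup_cons.mp hl with ⟨hx, hs⟩
    by_cases hxt : x = t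
    · subst hxt
      simp [ih hs, hx]
    · simp [hxt, ih hs, List.mem_cons, Ne.symm hxt]


-- the value a cell (i, j) of mat contributes, and the guarded cell read
def pvV (mat : List (List Int)) (i j : Int) : Int :=
  PySem.List.pyGetD (PySem.List.pyGetD mat i []) j 0

def pvG (mat : List (List Int)) (i j : Int) : Int :=
  if 0 ≤ i ∧ i < (mat.length:Int) ∧ 0 ≤ j ∧ j < (mat.length:Int) then pvV mat i j else 0

-- the delta one scatter step adds to cell (f, c)
def pvDelta (mat : List (List Int)) (f c i j di dj : Int) : Int :=
  if i + di = f ∧ j + dj = c ∧ ¬(di = 0 ∧ dj = 0) then pvV mat i j else 0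

theorem pvRect_sums0 (n : Nat) : pvRect n (pvSums0 (n:Int)) := by
  constructor
  · simp [pvSums0, PySem.List.length_pyRange_one]
  · intro row hrow
    rcases List.mem_map.mp hrow with ⟨x, _, hx⟩
    rw [← hx]
    simp [PySem.List.length_pyRange_one]

theorem pvGet_sums0 (N f c : Int) (hf : 0 ≤ f) (hc : 0 ≤ c) :
    pvGet (pvSums0 N) f c = 0 := by
  unfold pvGet
  rw [PySem.List.pyGetD_of_nonneg _ _ hf, PySem.List.pyGetD_of_nonneg _ _ hc]
  by_cases h : f.toNat < (pvSums0 N).length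
  · have hmem := pvGetD_mem (pvSums0 N) f.toNat [] h
    rcases List.mem_map.mp hmem with ⟨x, _, hx⟩
    rw [← hx]
    by_cases h2 : c.toNat < ((PySem.List.pyRange 0 N 1).map (fun _ => (0:Int))).length
    · have := pvGetD_mem _ c.toNat (0:Int) h2
      rcases List.mem_map.mp this with ⟨y, _, hy⟩
      rw [List.getD_eq_getElem?_getD, List.getElem?_eq_getElem h2]
      simp
    · rw [List.getD_eq_default _ _ (Nat.le_of_not_lt h2)]
  · rw [List.getD_eq_default _ _ (Nat.le_of_not_lt h)]
    simp

-- the scatter pass deposits, at each in-range cell (f, c), exactly the sum of all deltas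
theorem pvScatterGet (mat : List (List Int)) (f c : Int)
    (hf : 0 ≤ f) (hf' : f < (mat.length:Int)) (hc : 0 ≤ c) (hc' : c < (mat.length:Int)) :
    pvGet (pvScatter mat (mat.length:Int)) f c
      = ((PySem.List.pyRange 0 (mat.length:Int) 1).map (fun i =>
          ((PySem.List.pyRange 0 (mat.length:Int) 1).map (fun j =>
            (([-1, 0, 1] : List Int).map (fun di =>
              (([-1, 0, 1] : List Int).map (fun dj =>
                pvDelta mat f c i j di dj)).sum)).sum)).sum)).sum := by
  set n := mat.length with hn
  set N : Int := (n:Int) with hN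
  have h4 : ∀ (i j di : Int) (g : List (List Int)), pvRect n g →
      pvRect n (([-1, 0, 1] : List Int).foldl (fun g dj =>
        if di = 0 ∧ dj = 0 then g
        else
          if 0 ≤ i + di ∧ i + di < N ∧ 0 ≤ j + dj ∧ j + dj < N then
            pvAdd2 g (i + di) (j + dj) (pvV mat i j)
          else g) g) ∧
      pvGet (([-1, 0, 1] : List Int).foldl (fun g dj =>
        if di = 0 ∧ dj = 0 then g
        else
          if 0 ≤ i + di ∧ i + di < N ∧ 0 ≤ j + dj ∧ j + dj < N then
            pvAdd2 g (i + di) (j + dj) (pvV mat i j)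
          else g) g) f c
        = pvGet g f c + (([-1, 0, 1] : List Int).map (fun dj => pvDelta mat f c i j di dj)).sum := by
    intro i j di
    apply pvFoldGet n f c _ (fun dj => pvDelta mat f c i j di dj)
    intro g dj _ hg
    by_cases hcen : di = 0 ∧ dj = 0
    · rw [if_pos hcen]
      refine ⟨hg, ?_⟩
      unfold pvDelta
      rw [if_neg (by tauto)]
      simp
    · rw [if_neg hcen]
      by_cases hbnd : 0 ≤ i + di ∧ i + di < N ∧ 0 ≤ j + dj ∧ j + dj < N
      · rw [if_pos hbnd]
        refine ⟨pvRect_add2 n g _ _ _ hg hbnd.1 hbnd.2.1 hbnd.2.2.1, ?_⟩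
        rw [pvGet_add2 n g _ _ _ f c hg hbnd.1 hbnd.2.1 hbnd.2.2.1 hbnd.2.2.2 hf hf' hc hc']
        have hite : (if i + di = f ∧ j + dj = c then pvV mat i j else 0)
            = pvDelta mat f c i j di dj := by
          unfold pvDelta
          rw [if_congr (show (i + di = f ∧ j + dj = c)
            ↔ (i + di = f ∧ j + dj = c ∧ ¬(di = 0 ∧ dj = 0)) from by tauto) rfl rfl]
        rw [hite]
      · rw [if_neg hbnd]
        refine ⟨hg, ?_⟩
        unfold pvDelta
        rw [if_neg (by intro h; exact hbnd (by omega))]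
        simp
  have h3 : ∀ (i j : Int) (g : List (List Int)), pvRect n g →
      pvRect n (([-1, 0, 1] : List Int).foldl (fun g di =>
        ([-1, 0, 1] : List Int).foldl (fun g dj =>
          if di = 0 ∧ dj = 0 then g
          else
            if 0 ≤ i + di ∧ i + di < N ∧ 0 ≤ j + dj ∧ j + dj < N then
              pvAdd2 g (i + di) (j + dj) (pvV mat i j)
            else g) g) g) ∧
      pvGet (([-1, 0, 1] : List Int).foldl (fun g di =>
        ([-1, 0, 1] : List Int).foldl (fun g dj =>
          if di = 0 ∧ dj = 0 then g
          else
            if 0 ≤ i + di ∧ i + di < N ∧ 0 ≤ j + dj ∧ j + dj < N then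
              pvAdd2 g (i + di) (j + dj) (pvV mat i j)
            else g) g) g) f c
        = pvGet g f c + (([-1, 0, 1] : List Int).map (fun di =>
            (([-1, 0, 1] : List Int).map (fun dj => pvDelta mat f c i j di dj)).sum)).sum := by
    intro i j
    apply pvFoldGet n f c _ (fun di => (([-1, 0, 1] : List Int).map (fun dj => pvDelta mat f c i j di dj)).sum)
    intro g di _ hg
    exact h4 i j di g hg
  have h2 : ∀ (i : Int) (g : List (List Int)), pvRect n g →
      pvRect n ((PySem.List.pyRange 0 N 1).foldl (fun g j =>
        let v := PySem.List.pyGetD (PySem.List.pyGetD mat i []) j 0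
        ([-1, 0, 1] : List Int).foldl (fun g di =>
          ([-1, 0, 1] : List Int).foldl (fun g dj =>
            if di = 0 ∧ dj = 0 then g
            else
              if 0 ≤ i + di ∧ i + di < N ∧ 0 ≤ j + dj ∧ j + dj < N then
                pvAdd2 g (i + di) (j + dj) v
              else g) g) g) g) ∧
      pvGet ((PySem.List.pyRange 0 N 1).foldl (fun g j =>
        let v := PySem.List.pyGetD (PySem.List.pyGetD mat i []) j 0
        ([-1, 0, 1] : List Int).foldl (fun g di =>
          ([-1, 0, 1] : List Int).foldl (fun g dj =>
            if di = 0 ∧ dj = 0 then g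
            else
              if 0 ≤ i + di ∧ i + di < N ∧ 0 ≤ j + dj ∧ j + dj < N then
                pvAdd2 g (i + di) (j + dj) v
              else g) g) g) g) f c
        = pvGet g f c + ((PySem.List.pyRange 0 N 1).map (fun j =>
            (([-1, 0, 1] : List Int).map (fun di =>
              (([-1, 0, 1] : List Int).map (fun dj => pvDelta mat f c i j di dj)).sum)).sum)).sum := by
    intro i
    apply pvFoldGet n f c _ (fun j =>
      (([-1, 0, 1] : List Int).map (fun di =>
        (([-1, 0, 1] : List Int).map (fun dj => pvDelta mat f c i j di dj)).sum)).sum)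
    intro g j _ hg
    exact h3 i j g hg
  have h1 := pvFoldGet (α := Int) n f c _ (fun i =>
      ((PySem.List.pyRange 0 N 1).map (fun j =>
        (([-1, 0, 1] : List Int).map (fun di =>
          (([-1, 0, 1] : List Int).map (fun dj => pvDelta mat f c i j di dj)).sum)).sum)).sum)
    (PySem.List.pyRange 0 N 1)
    (fun g i _ hg => h2 i g hg)
    (pvSums0 N) (by rw [hN]; exact pvRect_sums0 n)
  unfold pvScatter
  rw [h1.2, pvGet_sums0 N f c hf hc, zero_add]

-- sums over two lists commute
theorem pvSumComm {α β : Type} (l : List α) (m : List β) (F : α → β → Int) :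
    (l.map (fun x => (m.map (fun y => F x y)).sum)).sum
      = (m.map (fun y => (l.map (fun x => F x y)).sum)).sum := by
  induction l with
  | nil => simp
  | cons x t ih =>
    simp only [List.map_cons, List.sum_cons, ih]
    rw [← PySem.List.sum_map_add_int]

-- a double point sum over the ranges collapses to a single guarded read
theorem pvPSd (mat : List (List Int)) (f c : Int) (d e : Int) :
    ((PySem.List.pyRange 0 (mat.length:Int) 1).map (fun i =>
      ((PySem.List.pyRange 0 (mat.length:Int) 1).map (fun j =>
        pvDelta mat f c i j d e)).sum)).sum
      = if ¬(d = 0 ∧ e = 0) then pvG mat (f - d) (c - e) else 0 := by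
  set N : Int := (mat.length:Int) with hN
  by_cases hde : d = 0 ∧ e = 0
  · rw [if_neg (by tauto)]
    have : ∀ i ∈ PySem.List.pyRange 0 N 1,
        ((PySem.List.pyRange 0 N 1).map (fun j => pvDelta mat f c i j d e)).sum = 0 := by
      intro i _
      have : ∀ j ∈ PySem.List.pyRange 0 N 1, pvDelta mat f c i j d e = 0 := by
        intro j _
        unfold pvDelta
        rw [if_neg (by tauto)]
      rw [List.map_congr_left this]
      simp
    rw [List.map_congr_left this]
    simp
  · rw [if_pos hde]
    have hinner : ∀ i ∈ PySem.List.pyRange 0 N 1,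
        ((PySem.List.pyRange 0 N 1).map (fun j => pvDelta mat f c i j d e)).sum
          = if i = f - d then (if 0 ≤ c - e ∧ c - e < N then pvV mat i (c - e) else 0) else 0 := by
      intro i _
      have hpt : ∀ j, pvDelta mat f c i j d e
          = if j = c - e then (if i = f - d then pvV mat i j else 0) else 0 := by
        intro j
        unfold pvDelta
        split_ifs <;> first | rfl | omega
      rw [List.map_congr_left (fun j _ => hpt j),
          pvPointSum _ (PySem.List.nodup_pyRange_one 0 N) (c - e)
            (fun j => if i = f - d then pvV mat i j else 0)]
      simp only [PySem.List.mem_pyRange_one]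
      split_ifs <;> rfl
    rw [List.map_congr_left hinner,
        pvPointSum _ (PySem.List.nodup_pyRange_one 0 N) (f - d)
          (fun i => if 0 ≤ c - e ∧ c - e < N then pvV mat i (c - e) else 0)]
    simp only [PySem.List.mem_pyRange_one]
    unfold pvG
    rw [← hN]
    split_ifs <;> first | rfl | omega

-- A's gather, written as a sum of guarded reads over the nine offsets
theorem pvGatherEq (mat : List (List Int)) (f c : Int) :
    sumarentorno mat f c
      = (([f-1, f, f+1] : List Int).map (fun i =>
          (([c-1, c, c+1] : List Int).map (fun j => pvG mat i j)).sum)).sum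
        - pvV mat f c := by
  have hRf : PySem.List.pyRange (f-1) (f+2) 1 = [f-1, f, f+1] := by
    rw [PySem.List.pyRange_one_cons (by omega), show f - 1 + 1 = f from by ring,
        PySem.List.pyRange_one_cons (by omega),
        PySem.List.pyRange_one_cons (by omega), show f + 1 + 1 = f + 2 from by ring,
        PySem.List.pyRange_one_eq_nil (by omega)]
  have hRc : PySem.List.pyRange (c-1) (c+2) 1 = [c-1, c, c+1] := by
    rw [PySem.List.pyRange_one_cons (by omega), show c - 1 + 1 = c from by ring,
        PySem.List.pyRange_one_cons (by omega),
        PySem.List.pyRange_one_cons (by omega), show c + 1 + 1 = c + 2 from by ring,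
        PySem.List.pyRange_one_eq_nil (by omega)]
  unfold sumarentorno
  dsimp only
  rw [hRf, hRc]
  have hstep : ∀ (s i : Int),
      ([c-1, c, c+1] : List Int).foldl (fun s j =>
        if i ≥ 0 ∧ i < (mat.length:Int) ∧ j ≥ 0 ∧ j < (mat.length:Int) then
          s + PySem.List.pyGetD (PySem.List.pyGetD mat i []) j 0
        else s) s
      = s + (([c-1, c, c+1] : List Int).map (fun j => pvG mat i j)).sum := by
    intro s i
    rw [pvIteFold _ (fun j => i ≥ 0 ∧ i < (mat.length:Int) ∧ j ≥ 0 ∧ j < (mat.length:Int))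
        (fun j => PySem.List.pyGetD (PySem.List.pyGetD mat i []) j 0) s]
    simp only [pvG, pvV, ge_iff_le]
  rw [PySem.List.foldl_congr_mem _ _ _ _ (fun s i _ => hstep s i), PySem.List.foldl_add, zero_add]
  unfold pvV
  rfl

-- per-cell value of the scatter table equals A's gather
-- the quadruple sum with the offset sums innermost equals the one with them outermost
theorem pvQuadSwap (R D : List Int) (G : Int → Int → Int → Int → Int) :
    (R.map (fun i => (R.map (fun j =>
      (D.map (fun di => (D.map (fun dj => G i j di dj)).sum)).sum)).sum)).sum
    = (D.map (fun di => (D.map (fun dj =>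
        (R.map (fun i => (R.map (fun j => G i j di dj)).sum)).sum)).sum)).sum := by
  calc
    (R.map (fun i => (R.map (fun j =>
        (D.map (fun di => (D.map (fun dj => G i j di dj)).sum)).sum)).sum)).sum
      = (R.map (fun i => (D.map (fun di =>
          (R.map (fun j => (D.map (fun dj => G i j di dj)).sum)).sum)).sum)).sum := by
        exact congrArg List.sum (List.map_congr_left (fun i _ => pvSumComm R D _))
    _ = (D.map (fun di => (R.map (fun i =>
          (R.map (fun j => (D.map (fun dj => G i j di dj)).sum)).sum)).sum)).sum :=
        pvSumComm R D _
    _ = (D.map (fun di => (R.map (fun i =>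
          (D.map (fun dj => (R.map (fun j => G i j di dj)).sum)).sum)).sum)).sum := by
        exact congrArg List.sum (List.map_congr_left (fun di _ =>
          congrArg List.sum (List.map_congr_left (fun i _ => pvSumComm R D _))))
    _ = (D.map (fun di => (D.map (fun dj =>
          (R.map (fun i => (R.map (fun j => G i j di dj)).sum)).sum)).sum)).sum := by
        exact congrArg List.sum (List.map_congr_left (fun di _ => pvSumComm R D _))

theorem pvTableEq (mat : List (List Int)) (f c : Int)
    (hf : 0 ≤ f) (hf' : f < (mat.length:Int)) (hc : 0 ≤ c) (hc' : c < (mat.length:Int)) :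
    PySem.List.pyGetD (PySem.List.pyGetD (pvScatter mat (mat.length:Int)) f []) c 0
      = sumarentorno mat f c := by
  show pvGet (pvScatter mat (mat.length:Int)) f c = _
  rw [pvScatterGet mat f c hf hf' hc hc',
      pvQuadSwap (PySem.List.pyRange 0 (mat.length:Int) 1) ([-1, 0, 1] : List Int)
        (fun i j di dj => pvDelta mat f c i j di dj),
      pvGatherEq mat f c]
  simp only [List.map_cons, List.map_nil, List.sum_cons, List.sum_nil, add_zero]
  rw [pvPSd mat f c (-1) (-1), pvPSd mat f c (-1) 0, pvPSd mat f c (-1) 1,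
      pvPSd mat f c 0 (-1), pvPSd mat f c 0 0, pvPSd mat f c 0 1,
      pvPSd mat f c 1 (-1), pvPSd mat f c 1 0, pvPSd mat f c 1 1]
  have hGfc : pvG mat f c = pvV mat f c := if_pos ⟨hf, hf', hc, hc'⟩
  norm_num [hGfc]
  ring

-- the two programs agree on Pre_
theorem pvMain (mat : List (List Int)) :
    buscarmaximoentorno mat = buscarmaximoentorno_alt mat := by
  unfold buscarmaximoentorno buscarmaximoentorno_alt
  dsimp only
  apply PySem.List.foldl_congr_mem
  intro st f hf
  apply PySem.List.foldl_congr_mem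
  intro st c hc
  dsimp only
  obtain ⟨hf0, hf1⟩ := PySem.List.mem_pyRange_one.mp hf
  obtain ⟨hc0, hc1⟩ := PySem.List.mem_pyRange_one.mp hc
  rw [pvTableEq mat f c hf0 hf1 hc0 hc1]

-- ===== VERDICT (by name: the statement is the Claim_ definition above) =====
theorem buscarmaximoentorno_spec : Claim_equal_buscarmaximoentorno := by
  intro mat _ _
  unfold Spec_buscarmaximoentorno
  exact pvMain mat
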